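-- pv_equiv track=rewrite | github.com/dobin/nkeyrollover | texture/filetextureloader.py | parseAnimationLineList
-- ===== SOURCE A (Python) =====
-- from typing import List
--
-- def parseAnimationLineList(
--
--     lineList :List[List[str]]
-- ) -> (List[List[List[str]]], int, int):
--     res = []
--     # find longest line to make animation
--     maxWidth = 0
--     for line in lineList:
--         if len(line) > maxWidth:
--             maxWidth = len(line)
--
--     maxHeight = 0
--     tmp = []
--     for line in lineList:
--         if line == '':
--             # empty line, means new animation.
--             # collect previous lines as a single animation frame
--             res.append(tmp)
--             if len(tmp) > maxHeight:
--                 maxHeight = len(tmp)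
--             tmp = []
--         else:
--             # make all lines same length
--             if not len(line) == maxWidth:
--                 line += ' ' * (maxWidth - len(line))
--             # build animation frame
--             tmp.append(list(line))
--     # fix if only one animation frame exists in file (no empty line)
--     if maxHeight == 0:
--         maxHeight = len(tmp)
--     res.append(tmp)
--
--     return (res, maxWidth, maxHeight)
-- ===== SOURCE B (Python) =====
-- def parseAnimationLineList(lineList):
--     maxWidth = max(map(len, lineList), default=0)
--     bounds = [i for i, line in enumerate(lineList) if line == '']
--     frames = [[list(line + ' ' * (maxWidth - len(line))) for line in lineList[a + 1:b]]
--               for a, b in zip([-1] + bounds, bounds + [len(lineList)])]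
--     maxHeight = max(map(len, frames[:-1]), default=0) or len(frames[-1])
--     return (frames, maxWidth, maxHeight)
-- ===== Notes on version B (the rewrite author's own statement) =====
-- stated objective: simpler
-- what changed: Replaces A's single imperative loop that threads res/tmp/maxHeight accumulators by computing the '' boundary indices once, slicing the line list between consecutive boundaries via zip, and taking maxWidth and maxHeight as closed-form maxima.
import Mathlib
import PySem

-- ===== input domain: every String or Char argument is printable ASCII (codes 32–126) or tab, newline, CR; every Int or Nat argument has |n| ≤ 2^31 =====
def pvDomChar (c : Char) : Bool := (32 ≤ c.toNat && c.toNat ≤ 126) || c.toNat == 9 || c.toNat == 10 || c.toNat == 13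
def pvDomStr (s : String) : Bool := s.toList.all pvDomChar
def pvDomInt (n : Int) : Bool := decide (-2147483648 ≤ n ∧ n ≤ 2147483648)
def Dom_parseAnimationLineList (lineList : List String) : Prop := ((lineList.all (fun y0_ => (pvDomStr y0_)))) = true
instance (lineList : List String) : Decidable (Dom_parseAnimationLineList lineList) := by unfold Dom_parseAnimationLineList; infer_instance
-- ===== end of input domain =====

-- B replaces A's single imperative loop that threads res/tmp/maxHeight accumulators by
-- computing the '' boundary indices once and slicing the line list between consecutive
-- boundaries, with maxWidth and maxHeight as closed-form maxima; objective: simpler.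

-- ===== PORT A =====
-- literal transliteration of A: two loops, the second maintaining (res, maxHeight, tmp)
def parseAnimationLineList (lineList : List String) : List (List (List String)) × Int × Int :=
  let maxWidth : Int := lineList.foldl
    (fun mw line => if PySem.Str.len line > mw then PySem.Str.len line else mw) 0
  let st := lineList.foldl
    (fun (st : List (List (List String)) × Int × List (List String)) line =>
      if line == "" then
        (st.1 ++ [st.2.2],
         if (st.2.2.length : Int) > st.2.1 then (st.2.2.length : Int) else st.2.1,
         [])
      else
        -- line += ' ' * (maxWidth - len(line)) when len(line) ≠ maxWidth; then tmp.append(list(line))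
        let line2 := if ¬ (PySem.Str.len line == maxWidth) then
            line.toList ++ PySem.List.pyRepeat [' '] (maxWidth - PySem.Str.len line)
          else line.toList
        (st.1, st.2.1, st.2.2 ++ [line2.map (fun c => String.ofList [c])]))
    ([], 0, [])
  let mh : Int := if st.2.1 == 0 then (st.2.2.length : Int) else st.2.1
  (st.1 ++ [st.2.2], maxWidth, mh)

-- ===== PORT B =====
-- list(line + ' ' * (maxWidth - len(line))) — a Python str is its code points, so we pad the char list
def pvPad (w : Int) (line : String) : List String :=
  (line.toList ++ PySem.List.pyRepeat [' '] (w - PySem.Str.len line)).map (fun c => String.ofList [c])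

def parseAnimationLineList_alt (lineList : List String) : List (List (List String)) × Int × Int :=
  let maxWidth : Int := lineList.foldl (fun m l => max m (PySem.Str.len l)) 0
  let bounds : List Int :=
    ((PySem.List.enumerate lineList).filter (fun p => p.2 == "")).map (fun p => p.1)
  let frames := (([-1] ++ bounds).zip (bounds ++ [(lineList.length : Int)])).map
    (fun ab : Int × Int => (PySem.List.slice lineList (some (ab.1 + 1)) (some ab.2)).map (pvPad maxWidth))
  let mh0 : Int := frames.dropLast.foldl (fun m f => max m (f.length : Int)) 0
  -- mh0 or len(frames[-1]): frames is never empty (the zip always has a first pair)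
  let mh : Int := if mh0 == 0 then ((frames.getLastD []).length : Int) else mh0
  (frames, maxWidth, mh)

-- ===== PRECONDITION & SPEC =====
def Spec_parseAnimationLineList (lineList : List String) (out : List (List (List String)) × Int × Int) : Prop := out = parseAnimationLineList_alt lineList
instance (lineList : List String) (out : List (List (List String)) × Int × Int) : Decidable (Spec_parseAnimationLineList lineList out) := by unfold Spec_parseAnimationLineList; infer_instance

-- ===== CLAIM (what is proved, stated in full; the proofs are below) =====
def Claim_equal_parseAnimationLineList : Prop := ∀ (lineList : List String), Dom_parseAnimationLineList lineList → Spec_parseAnimationLineList lineList (parseAnimationLineList lineList)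

-- ===== LEMMAS AND PROOFS =====

-- a common middleman: the recursive partition of the lines at '' boundaries
def pvSplitFrames : List String → List (List String)
  | [] => [[]]
  | h :: rest =>
    if h == "" then [] :: pvSplitFrames rest
    else
      match pvSplitFrames rest with
      | s0 :: ss => (h :: s0) :: ss
      | [] => [[h]]

def pvFrames (w : Int) (lines : List String) : List (List (List String)) :=
  (pvSplitFrames lines).map (fun seg => seg.map (pvPad w))

-- 'if f x > m then f x else m' is 'max m (f x)', through any fold
theorem pv_foldl_ifmax_eq_max {α : Type} (f : α → Int) (l : List α) :
    ∀ init : Int, l.foldl (fun m x => if f x > m then f x else m) init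
      = l.foldl (fun m x => max m (f x)) init := by
  induction l with
  | nil => intro init; rfl
  | cons h t ih =>
      intro init
      simp only [List.foldl_cons, ih]
      congr 1
      omega

theorem pv_maxw_eq (l : List String) :
    l.foldl (fun mw line => if PySem.Str.len line > mw then PySem.Str.len line else mw) 0
      = l.foldl (fun m s => max m (PySem.Str.len s)) 0 :=
  pv_foldl_ifmax_eq_max _ l 0

theorem pv_mh_eq (l : List (List (List String))) :
    l.foldl (fun m f => if (f.length : Int) > m then (f.length : Int) else m) 0
      = l.foldl (fun m f => max m (f.length : Int)) 0 :=
  pv_foldl_ifmax_eq_max _ l 0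

theorem pvSplitFrames_ne_nil (lines : List String) : pvSplitFrames lines ≠ [] := by
  cases lines with
  | nil => simp [pvSplitFrames]
  | cons h t =>
      unfold pvSplitFrames
      split
      · simp
      · split <;> simp

theorem pvFrames_ne_nil (w : Int) (lines : List String) : pvFrames w lines ≠ [] := by
  simp [pvFrames, pvSplitFrames_ne_nil]

theorem pv_dropLast_append_getLastD {α : Type} (l : List α) (d : α) (h : l ≠ []) :
    l.dropLast ++ [l.getLastD d] = l := by
  induction l with
  | nil => exact absurd rfl h
  | cons x xs ih =>
      cases xs with
      | nil => rfl
      | cons y ys => simpa using ih (by simp)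

-- A's in-loop padding equals B's unconditional padding
theorem pvPadA_eq (w : Int) (line : String) :
    ((if ¬ (PySem.Str.len line == w) then
        line.toList ++ PySem.List.pyRepeat [' '] (w - PySem.Str.len line)
      else line.toList).map (fun c => String.ofList [c])) = pvPad w line := by
  unfold pvPad
  split
  · rfl
  · rename_i hEq
    simp only [beq_iff_eq, not_not] at hEq
    rw [hEq]
    simp [PySem.List.pyRepeat_singleton]

-- ===== A side: the loop invariant =====

-- the key loop invariant: A's second fold, from any state, in terms of the partition
theorem pv_foldA (w : Int) (lines : List String) :
    ∀ (res : List (List (List String))) (mh : Int) (tmp : List (List String)),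
    lines.foldl
      (fun (st : List (List (List String)) × Int × List (List String)) line =>
        if line == "" then
          (st.1 ++ [st.2.2],
           if (st.2.2.length : Int) > st.2.1 then (st.2.2.length : Int) else st.2.1,
           [])
        else
          let line2 := if ¬ (PySem.Str.len line == w) then
              line.toList ++ PySem.List.pyRepeat [' '] (w - PySem.Str.len line)
            else line.toList
          (st.1, st.2.1, st.2.2 ++ [line2.map (fun c => String.ofList [c])]))
      (res, mh, tmp)
    = (res ++ (List.modifyHead (tmp ++ ·) (pvFrames w lines)).dropLast,
       (List.modifyHead (tmp ++ ·) (pvFrames w lines)).dropLast.foldl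
         (fun m f => if (f.length : Int) > m then (f.length : Int) else m) mh,
       (List.modifyHead (tmp ++ ·) (pvFrames w lines)).getLastD []) := by
  induction lines with
  | nil =>
      intro res mh tmp
      simp [pvFrames, pvSplitFrames]
  | cons h t ih =>
      intro res mh tmp
      by_cases hh : h = ""
      · subst hh
        obtain ⟨f, fs, hF⟩ : ∃ f fs, pvFrames w t = f :: fs := by
          cases hcase : pvFrames w t with
          | nil => exact absurd hcase (pvFrames_ne_nil w t)
          | cons f fs => exact ⟨f, fs, rfl⟩
        have hframes : pvFrames w ("" :: t) = [] :: pvFrames w t := by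
          simp [pvFrames, pvSplitFrames]
        simp only [List.foldl_cons, if_pos (by rfl : ("" == "") = true)]
        rw [ih, hframes, hF]
        simp [List.modifyHead]
      · obtain ⟨s0, ss, hS⟩ : ∃ s0 ss, pvSplitFrames t = s0 :: ss := by
          cases hcase : pvSplitFrames t with
          | nil => exact absurd hcase (pvSplitFrames_ne_nil t)
          | cons s0 ss => exact ⟨s0, ss, rfl⟩
        have hbe : (h == "") = false := by simpa using hh
        have hframes : pvFrames w (h :: t)
            = (pvPad w h :: s0.map (pvPad w)) :: ss.map (fun seg => seg.map (pvPad w)) := by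
          simp [pvFrames, pvSplitFrames, hbe, hS]
        have hFt : pvFrames w t = s0.map (pvPad w) :: ss.map (fun seg => seg.map (pvPad w)) := by
          simp [pvFrames, hS]
        simp only [List.foldl_cons, hbe, Bool.false_eq_true, if_false]
        rw [pvPadA_eq, ih, hframes, hFt]
        simp [List.modifyHead, List.append_assoc]

-- ===== B side: boundary indices + slices give the same partition =====

-- the '' positions of a line list (B's 'bounds')
def pvPos (lines : List String) : List Int :=
  ((PySem.List.enumerate lines).filter (fun p => p.2 == "")).map (fun p => p.1)

theorem pv_enumerate_shift {α : Type} (xs : List α) :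
    ∀ s : Int, PySem.List.enumerate xs (s + 1)
      = (PySem.List.enumerate xs s).map (fun p => (p.1 + 1, p.2)) := by
  induction xs with
  | nil => intro s; simp [PySem.List.enumerate_nil]
  | cons x t ih => intro s; simp [PySem.List.enumerate_cons, ih (s + 1)]

theorem pvPos_cons (h : String) (t : List String) :
    pvPos (h :: t) = if h == "" then 0 :: (pvPos t).map (· + 1) else (pvPos t).map (· + 1) := by
  unfold pvPos
  rw [PySem.List.enumerate_cons, pv_enumerate_shift t 0, List.filter_cons]
  by_cases hh : (h == "") = true
  · simp [hh, List.filter_map, Function.comp_def, List.map_map]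
  · simp [hh, List.filter_map, Function.comp_def, List.map_map]

theorem pvPos_cons_empty (t : List String) :
    pvPos ("" :: t) = 0 :: (pvPos t).map (· + 1) := by
  rw [pvPos_cons]; simp

theorem pvPos_cons_ne (h : String) (t : List String) (hh : (h == "") = false) :
    pvPos (h :: t) = (pvPos t).map (· + 1) := by
  rw [pvPos_cons, hh]; simp

theorem pvPos_nonneg (lines : List String) : ∀ x ∈ pvPos lines, 0 ≤ x := by
  induction lines with
  | nil => simp [pvPos, PySem.List.enumerate_nil]
  | cons h t ih =>
      intro x hx
      rw [pvPos_cons] at hx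
      by_cases hh : (h == "") = true
      · rw [if_pos hh] at hx
        rcases List.mem_cons.mp hx with h0 | hmem
        · omega
        · obtain ⟨y, hy, rfl⟩ := List.mem_map.mp hmem
          have := ih y hy; omega
      · rw [if_neg hh] at hx
        obtain ⟨y, hy, rfl⟩ := List.mem_map.mp hx
        have := ih y hy; omega

-- slicing one position to the right of a cons is slicing the tail
theorem pv_slice_shift {α : Type} (h : α) (t : List α) (a b : Int) (ha : 0 ≤ a) (hb : 0 ≤ b) :
    PySem.List.slice (h :: t) (some (a + 1)) (some (b + 1)) = PySem.List.slice t (some a) (some b) := by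
  rw [PySem.List.slice_toNat _ (by omega) (by omega), PySem.List.slice_toNat _ ha hb]
  have h1 : (a + 1).toNat = a.toNat + 1 := by omega
  have h2 : (b + 1).toNat = b.toNat + 1 := by omega
  rw [h1, h2]
  simp [Nat.succ_sub_succ]

theorem pv_slice_cons_head {α : Type} (h : α) (t : List α) (b : Int) (hb : 0 ≤ b) :
    PySem.List.slice (h :: t) (some 0) (some (b + 1)) = h :: PySem.List.slice t (some 0) (some b) := by
  rw [PySem.List.slice_toNat _ (by omega) (by omega), PySem.List.slice_toNat _ le_rfl hb]
  have h2 : (b + 1).toNat = b.toNat + 1 := by omega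
  simp [h2]

-- B's slice-between-boundaries list IS the recursive partition
theorem pv_zip_eq_split (lines : List String) :
    ((((-1) :: pvPos lines).zip (pvPos lines ++ [(lines.length : Int)])).map
        (fun ab => PySem.List.slice lines (some (ab.1 + 1)) (some ab.2)))
      = pvSplitFrames lines := by
  induction lines with
  | nil =>
      simp [pvPos, PySem.List.enumerate_nil, pvSplitFrames, PySem.List.slice_toNat]
  | cons h t ih =>
      have hmem : ∀ ab ∈ ((-1) :: pvPos t).zip (pvPos t ++ [(t.length : Int)]),
          -1 ≤ ab.1 ∧ 0 ≤ ab.2 := by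
        intro ab hab
        obtain ⟨h1, h2⟩ := List.of_mem_zip hab
        constructor
        · rcases List.mem_cons.mp h1 with he | hm
          · omega
          · have := pvPos_nonneg t _ hm; omega
        · rcases List.mem_append.mp h2 with hm | hm
          · exact pvPos_nonneg t _ hm
          · have : ab.2 = (t.length : Int) := by simpa using hm
            omega
      by_cases hh : (h == "") = true
      · have hh' : h = "" := by simpa using hh
        subst hh'
        rw [pvPos_cons_empty]
        have hlen : ((("" :: t).length : Int)) = (t.length : Int) + 1 := by
          simp
        rw [hlen]
        have hz : ((0 : Int) :: (pvPos t).map (· + 1)) = ((-1 :: pvPos t).map (· + 1)) := by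
          simp
        have hz2 : ((pvPos t).map (· + 1) ++ [(t.length : Int) + 1])
            = (pvPos t ++ [(t.length : Int)]).map (· + 1) := by
          simp
        show ((((-1) :: 0 :: (pvPos t).map (· + 1)).zip
              ((0 :: (pvPos t).map (· + 1)) ++ [(t.length : Int) + 1])).map
                (fun ab => PySem.List.slice ("" :: t) (some (ab.1 + 1)) (some ab.2)))
            = pvSplitFrames ("" :: t)
        rw [show ((0 :: (pvPos t).map (· + 1)) ++ [(t.length : Int) + 1])
              = 0 :: ((pvPos t).map (· + 1) ++ [(t.length : Int) + 1]) from rfl]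
        rw [List.zip_cons_cons, List.map_cons]
        rw [hz, hz2, List.zip_map, List.map_map]
        have hcong : ∀ ab ∈ ((-1) :: pvPos t).zip (pvPos t ++ [(t.length : Int)]),
            ((fun ab => PySem.List.slice ("" :: t) (some (ab.1 + 1)) (some ab.2)) ∘
              Prod.map (· + 1) (· + 1)) ab
            = PySem.List.slice t (some (ab.1 + 1)) (some ab.2) := by
          intro ab hab
          obtain ⟨ha1, ha2⟩ := hmem ab hab
          simp only [Function.comp_apply]
          exact pv_slice_shift _ _ (ab.1 + 1) ab.2 (by omega) ha2
        rw [List.map_congr_left hcong, ih]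
        have hhead : PySem.List.slice ("" :: t) (some ((-1 : Int) + 1)) (some 0) = [] := by
          rw [show ((-1 : Int) + 1) = (0 : Int) from rfl]
          rw [PySem.List.slice_toNat _ le_rfl le_rfl]
          simp
        rw [hhead]
        simp [pvSplitFrames]
      · obtain ⟨s0, ss, hS⟩ : ∃ s0 ss, pvSplitFrames t = s0 :: ss := by
          cases hcase : pvSplitFrames t with
          | nil => exact absurd hcase (pvSplitFrames_ne_nil t)
          | cons s0 ss => exact ⟨s0, ss, rfl⟩
        obtain ⟨y, ys, hY⟩ : ∃ y ys, pvPos t ++ [(t.length : Int)] = y :: ys := by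
          cases hcase : pvPos t ++ [(t.length : Int)] with
          | nil => exact absurd hcase (by simp)
          | cons y ys => exact ⟨y, ys, rfl⟩
        have hy0 : 0 ≤ y := by
          have : y ∈ pvPos t ++ [(t.length : Int)] := by rw [hY]; simp
          rcases List.mem_append.mp this with hm | hm
          · exact pvPos_nonneg t _ hm
          · simp at hm; omega
        have hys : ∀ b ∈ ys, 0 ≤ b := by
          intro b hb
          have : b ∈ pvPos t ++ [(t.length : Int)] := by rw [hY]; simp [hb]
          rcases List.mem_append.mp this with hm | hm
          · exact pvPos_nonneg t _ hm
          · simp at hm; omega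
        rw [pvPos_cons_ne h t (by simpa using hh)]
        have hlen : (((h :: t).length : Int)) = (t.length : Int) + 1 := by
          simp
        rw [hlen]
        have hz2 : ((pvPos t).map (· + 1) ++ [(t.length : Int) + 1])
            = (pvPos t ++ [(t.length : Int)]).map (· + 1) := by
          simp
        rw [show ((-1 : Int) :: (pvPos t).map (· + 1)) = [(-1 : Int)] ++ (pvPos t).map (· + 1) from rfl]
        rw [List.singleton_append, hz2, hY, List.map_cons, List.zip_cons_cons, List.map_cons]
        -- head frame: slice (h :: t) 0 (y + 1) = h :: slice t 0 y
        have hhead : PySem.List.slice (h :: t) (some ((-1 : Int) + 1)) (some (y + 1))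
            = h :: PySem.List.slice t (some 0) (some y) := by
          rw [show ((-1 : Int) + 1) = (0 : Int) from rfl]
          exact pv_slice_cons_head h t y hy0
        rw [hhead]
        -- tail frames: shifted pairs slice the tail
        have hIH := ih
        rw [hY, List.zip_cons_cons, List.map_cons] at hIH
        rw [show ((-1 : Int) + 1) = (0 : Int) from rfl] at hIH
        -- pvSplitFrames t = slice t 0 y :: map slice (zip (pvPos t) ys)
        rw [hS] at hIH
        have hs0 : PySem.List.slice t (some 0) (some y) = s0 := (List.cons.injEq _ _ _ _ ▸ hIH).1
        have hss : ((pvPos t).zip ys).map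
            (fun ab => PySem.List.slice t (some (ab.1 + 1)) (some ab.2)) = ss :=
          (List.cons.injEq _ _ _ _ ▸ hIH).2
        have hmem2 : ∀ ab ∈ (pvPos t).zip ys, 0 ≤ ab.1 ∧ 0 ≤ ab.2 := by
          intro ab hab
          obtain ⟨h1, h2⟩ := List.of_mem_zip hab
          exact ⟨pvPos_nonneg t _ h1, hys _ h2⟩
        have hcong : ∀ ab ∈ (pvPos t).zip ys,
            ((fun ab => PySem.List.slice (h :: t) (some (ab.1 + 1)) (some ab.2)) ∘
              Prod.map (· + 1) (· + 1)) ab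
            = PySem.List.slice t (some (ab.1 + 1)) (some ab.2) := by
          intro ab hab
          obtain ⟨ha1, ha2⟩ := hmem2 ab hab
          simp only [Function.comp_apply]
          exact pv_slice_shift _ _ (ab.1 + 1) ab.2 (by omega) ha2
        rw [List.zip_map, List.map_map, List.map_congr_left hcong, hss, hs0]
        simp [pvSplitFrames, hh, hS]

-- B's padded frames are pvFrames
theorem pv_framesB_eq (w : Int) (lines : List String) :
    ((((-1) :: pvPos lines).zip (pvPos lines ++ [(lines.length : Int)])).map
        (fun ab => (PySem.List.slice lines (some (ab.1 + 1)) (some ab.2)).map (pvPad w)))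
      = pvFrames w lines := by
  unfold pvFrames
  rw [← pv_zip_eq_split, List.map_map]
  exact List.map_congr_left (fun ab _ => rfl)

-- ===== VERDICT (by name: the statement is the Claim_ definition above) =====
theorem parseAnimationLineList_spec : Claim_equal_parseAnimationLineList := by
  intro lineList _
  unfold Spec_parseAnimationLineList
  simp only [parseAnimationLineList, parseAnimationLineList_alt]
  rw [pv_maxw_eq]
  rw [pv_foldA (lineList.foldl (fun m l => max m (PySem.Str.len l)) 0) lineList [] 0 []]
  have hmod : List.modifyHead (fun x => ([] : List (List String)) ++ x)
      (pvFrames (lineList.foldl (fun m l => max m (PySem.Str.len l)) 0) lineList)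
      = pvFrames (lineList.foldl (fun m l => max m (PySem.Str.len l)) 0) lineList := by
    cases pvFrames (lineList.foldl (fun m l => max m (PySem.Str.len l)) 0) lineList <;>
      simp [List.modifyHead]
  rw [hmod]
  simp only [List.nil_append]
  rw [pv_mh_eq]
  simp only [List.singleton_append]
  have hb : ((PySem.List.enumerate lineList).filter (fun p => p.2 == "")).map (fun p => p.1)
      = pvPos lineList := rfl
  rw [hb, pv_framesB_eq]
  refine Prod.ext ?_ rfl
  exact pv_dropLast_append_getLastD _ _ (pvFrames_ne_nil _ lineList)
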